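-- pv_equiv track=rewrite | github.com/nglongceh/HWbyNglong | num2text.py | int_to_text
-- ===== SOURCE A (Python) =====
-- def int_to_text(num):
--     d = {0: 'khong', 1: 'mot', 2: 'hai', 3: 'ba', 4: 'bon', 5: 'nam',
--          6: 'sau', 7: 'bay', 8: 'tam', 9: 'chin', 10: 'muoi',
--          11: 'muoi mot', 12: 'muoi hai', 13: 'muoi ba', 14: 'muoi bon',
--          15: 'muoi lam', 16: 'muoi sau', 17: 'muoi bay', 18: 'muoi tam',
--          19: 'muoi chin', 20: 'hai muoi',
--          30: 'ba muoi', 40: 'bon muoi', 50: 'nam muoi', 60: 'sau muoi',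
--          70: 'bay muoi', 80: 'tam muoi', 90: 'chin muoi'}
--     k = 1000
--     m = k * 1000
--     b = m * 1000
--     t = b * 1000
--
--     assert (0 <= num)
--
--     if num < 20:
--         return d[num]
--
--     if num < 100:
--         if num % 10 == 0:
--             return d[num]
--         else:
--             return d[num // 10 * 10] + ' ' + d[num % 10]
--
--     if num < k:
--         if num % 100 == 0:
--             return d[num // 100] + ' ' + ' tram'
--         else:
--             return d[num // 100] + ' ' + ' tram ' + int_to_text(num % 100)
--
--     if num < m:
--         if num % k == 0:
--             return int_to_text(num // k) + ' ' + 'nghin'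
--         else:
--             return int_to_text(num // k) + ' ' + 'nghin ' + int_to_text(num % k)
--
--     if num < b:
--         if (num % m) == 0:
--             return int_to_text(num // m) + ' ' + 'trieu'
--         else:
--             return int_to_text(num // m) + ' ' + 'trieu, ' + int_to_text(num % m)
--
--     if num < t:
--         if (num % b) == 0:
--             return int_to_text(num // b) + ' ' + 'ty'
--         else:
--             return int_to_text(num // b) + ' ' + 'ty, ' + int_to_text(num % b)
--
--     if num % t == 0:
--         return int_to_text(num // t) + ' ' + 'nghin ty'
--     else:
--         return int_to_text(num // t) + ' ' + 'nghin ty, ' + int_to_text(num % t)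
-- ===== SOURCE B (Python) =====
-- # B: iterative band-driven formatter. A three-digit helper renders chunks (reusing
-- # the same tens/units dict, reproducing the ' tram' double space); numbers >= 1000
-- # are split into thousand-groups emitted high-to-low in one pass, with each scale
-- # word's separator (', ' after trieu/ty, ' ' after nghin) taken from a table, and
-- # values >= 10**12 handled by recursing on the 'nghin ty' quotient.
-- def int_to_text(num):
--     d = {0: 'khong', 1: 'mot', 2: 'hai', 3: 'ba', 4: 'bon', 5: 'nam',
--          6: 'sau', 7: 'bay', 8: 'tam', 9: 'chin', 10: 'muoi',
--          11: 'muoi mot', 12: 'muoi hai', 13: 'muoi ba', 14: 'muoi bon',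
--          15: 'muoi lam', 16: 'muoi sau', 17: 'muoi bay', 18: 'muoi tam',
--          19: 'muoi chin', 20: 'hai muoi',
--          30: 'ba muoi', 40: 'bon muoi', 50: 'nam muoi', 60: 'sau muoi',
--          70: 'bay muoi', 80: 'tam muoi', 90: 'chin muoi'}
--
--     def under_1000(n):
--         if n < 20:
--             return d[n]
--         if n < 100:
--             if n % 10 == 0:
--                 return d[n]
--             return d[n // 10 * 10] + ' ' + d[n % 10]
--         s = d[n // 100] + '  tram'
--         if n % 100:
--             s += ' ' + under_1000(n % 100)
--         return s
--
--     assert 0 <= num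
--     if num >= 10 ** 12:
--         head = int_to_text(num // 10 ** 12) + ' nghin ty'
--         rest = num % 10 ** 12
--         return head if rest == 0 else head + ', ' + int_to_text(rest)
--     if num < 1000:
--         return under_1000(num)
--     out = ''
--     pending_sep = ''
--     for scale, word, sep in ((10 ** 9, 'ty', ', '), (10 ** 6, 'trieu', ', '),
--                              (10 ** 3, 'nghin', ' ')):
--         g = num // scale % 1000
--         if g:
--             out += pending_sep + under_1000(g) + ' ' + word
--             pending_sep = sep
--     if num % 1000:
--         out += pending_sep + under_1000(num % 1000)
--     return out
-- ===== Notes on version B (the rewrite author's own statement) =====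
-- stated objective: alternative
-- what changed: A recurses on quotient/remainder at every scale; B renders three-digit chunks with one helper and emits the nghin/trieu/ty bands in a single iterative pass over a scale-word/separator table (recursing only for the 10^12 'nghin ty' chaining), concatenating chunks in an accumulator.
import Mathlib
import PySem

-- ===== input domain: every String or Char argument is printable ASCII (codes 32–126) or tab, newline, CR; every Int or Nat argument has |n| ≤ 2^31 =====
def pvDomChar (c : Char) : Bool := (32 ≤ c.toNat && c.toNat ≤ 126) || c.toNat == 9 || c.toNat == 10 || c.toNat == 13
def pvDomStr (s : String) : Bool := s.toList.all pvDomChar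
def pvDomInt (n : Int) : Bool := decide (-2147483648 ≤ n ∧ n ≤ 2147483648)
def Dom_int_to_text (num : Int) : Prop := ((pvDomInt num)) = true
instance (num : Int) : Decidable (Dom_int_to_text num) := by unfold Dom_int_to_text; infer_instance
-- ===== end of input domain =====

-- B replaces A's recursion over quotient/remainder above 1000 by a single pass over a
-- band table (ty/trieu/nghin) driven from a three-digit helper; same exact output.


-- ===== PORT A =====
-- the literal dict d of Source A (PySem.Dict, insertion order)
def aDict : PySem.Dict Int String := PySem.Dict.ofList
  [(0, "khong"), (1, "mot"), (2, "hai"), (3, "ba"), (4, "bon"), (5, "nam"),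
   (6, "sau"), (7, "bay"), (8, "tam"), (9, "chin"), (10, "muoi"),
   (11, "muoi mot"), (12, "muoi hai"), (13, "muoi ba"), (14, "muoi bon"),
   (15, "muoi lam"), (16, "muoi sau"), (17, "muoi bay"), (18, "muoi tam"),
   (19, "muoi chin"), (20, "hai muoi"),
   (30, "ba muoi"), (40, "bon muoi"), (50, "nam muoi"), (60, "sau muoi"),
   (70, "bay muoi"), (80, "tam muoi"), (90, "chin muoi")]

-- termination helpers for the ports (cited by decreasing_by)
lemma pvTerm_floordiv (n d : Int) (hd : 1 < d) (hn : d ≤ n) :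
    (PySem.Int.floordiv n d).toNat < n.toNat := by
  rw [PySem.Int.floordiv_eq_ediv_of_pos (by omega)]
  have h1 : n / d < n := by
    apply Int.ediv_lt_of_lt_mul (by omega)
    nlinarith
  have h2 : 0 ≤ n / d := Int.ediv_nonneg (by omega) (by omega)
  omega

lemma pvTerm_mod (n d : Int) (hd : 0 < d) (hn : d ≤ n) :
    (PySem.Int.mod n d).toNat < n.toNat := by
  rw [PySem.Int.mod_eq_emod_of_pos hd]
  have h1 : n % d < d := Int.emod_lt_of_pos n hd
  have h2 : 0 ≤ n % d := Int.emod_nonneg n (by omega)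
  omega

-- d[x]: every lookup A performs in a taken branch hits a present key, so getD "" is exact there.
def int_to_text (num : Int) : String :=
  if _h1 : num < 20 then aDict.getD num ""
  else if _h2 : num < 100 then
    if PySem.Int.mod num 10 = 0 then aDict.getD num ""
    else aDict.getD (PySem.Int.floordiv num 10 * 10) "" ++ " " ++ aDict.getD (PySem.Int.mod num 10) ""
  else if _h3 : num < 1000 then
    if PySem.Int.mod num 100 = 0 then aDict.getD (PySem.Int.floordiv num 100) "" ++ " " ++ " tram"
    else aDict.getD (PySem.Int.floordiv num 100) "" ++ " " ++ " tram " ++ int_to_text (PySem.Int.mod num 100)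
  else if _h4 : num < 1000000 then
    if PySem.Int.mod num 1000 = 0 then int_to_text (PySem.Int.floordiv num 1000) ++ " " ++ "nghin"
    else int_to_text (PySem.Int.floordiv num 1000) ++ " " ++ "nghin " ++ int_to_text (PySem.Int.mod num 1000)
  else if _h5 : num < 1000000000 then
    if PySem.Int.mod num 1000000 = 0 then int_to_text (PySem.Int.floordiv num 1000000) ++ " " ++ "trieu"
    else int_to_text (PySem.Int.floordiv num 1000000) ++ " " ++ "trieu, " ++ int_to_text (PySem.Int.mod num 1000000)
  else if _h6 : num < 1000000000000 then
    if PySem.Int.mod num 1000000000 = 0 then int_to_text (PySem.Int.floordiv num 1000000000) ++ " " ++ "ty"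
    else int_to_text (PySem.Int.floordiv num 1000000000) ++ " " ++ "ty, " ++ int_to_text (PySem.Int.mod num 1000000000)
  else
    if PySem.Int.mod num 1000000000000 = 0 then int_to_text (PySem.Int.floordiv num 1000000000000) ++ " " ++ "nghin ty"
    else int_to_text (PySem.Int.floordiv num 1000000000000) ++ " " ++ "nghin ty, " ++ int_to_text (PySem.Int.mod num 1000000000000)
termination_by num.toNat
decreasing_by
  all_goals first
    | exact pvTerm_floordiv _ _ (by norm_num) (by omega)
    | exact pvTerm_mod _ _ (by norm_num) (by omega)

-- ===== PORT B =====
def bDict : PySem.Dict Int String := PySem.Dict.ofList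
  [(0, "khong"), (1, "mot"), (2, "hai"), (3, "ba"), (4, "bon"), (5, "nam"),
   (6, "sau"), (7, "bay"), (8, "tam"), (9, "chin"), (10, "muoi"),
   (11, "muoi mot"), (12, "muoi hai"), (13, "muoi ba"), (14, "muoi bon"),
   (15, "muoi lam"), (16, "muoi sau"), (17, "muoi bay"), (18, "muoi tam"),
   (19, "muoi chin"), (20, "hai muoi"),
   (30, "ba muoi"), (40, "bon muoi"), (50, "nam muoi"), (60, "sau muoi"),
   (70, "bay muoi"), (80, "tam muoi"), (90, "chin muoi")]

-- Source B's under_1000 helper (same exactness note on d[x] as in port A)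
def under1000 (n : Int) : String :=
  if _h1 : n < 20 then bDict.getD n ""
  else if _h2 : n < 100 then
    if PySem.Int.mod n 10 = 0 then bDict.getD n ""
    else bDict.getD (PySem.Int.floordiv n 10 * 10) "" ++ " " ++ bDict.getD (PySem.Int.mod n 10) ""
  else
    let s := bDict.getD (PySem.Int.floordiv n 100) "" ++ "  tram"
    if PySem.Int.mod n 100 ≠ 0 then s ++ " " ++ under1000 (PySem.Int.mod n 100) else s
termination_by n.toNat
decreasing_by
  exact pvTerm_mod _ _ (by norm_num) (by omega)

def int_to_text_alt (num : Int) : String :=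
  if _h : 1000000000000 ≤ num then
    let head := int_to_text_alt (PySem.Int.floordiv num 1000000000000) ++ " nghin ty"
    let rest := PySem.Int.mod num 1000000000000
    if rest = 0 then head else head ++ ", " ++ int_to_text_alt rest
  else if num < 1000 then under1000 num
  else
    let st := [((1000000000 : Int), "ty", ", "), ((1000000 : Int), "trieu", ", "),
               ((1000 : Int), "nghin", " ")].foldl
      (fun (acc : String × String) (band : Int × String × String) =>
        let g := PySem.Int.mod (PySem.Int.floordiv num band.1) 1000
        if g ≠ 0 then (acc.1 ++ acc.2 ++ under1000 g ++ " " ++ band.2.1, band.2.2) else acc)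
      ("", "")
    if PySem.Int.mod num 1000 ≠ 0 then st.1 ++ st.2 ++ under1000 (PySem.Int.mod num 1000) else st.1
termination_by num.toNat
decreasing_by
  all_goals first
    | exact pvTerm_floordiv _ _ (by norm_num) (by omega)
    | exact pvTerm_mod _ _ (by norm_num) (by omega)

-- ===== PRECONDITION & SPEC =====
-- A (and B) assert nonnegativity and raise AssertionError on negative inputs: Pre_ admits exactly the nonnegative ones.
def Pre_int_to_text (num : Int) : Prop := 0 ≤ num
instance (num : Int) : Decidable (Pre_int_to_text num) := by unfold Pre_int_to_text; infer_instance
def pvWitness_int_to_text : Int := (1034025)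

def Spec_int_to_text (num : Int) (out : String) : Prop := out = int_to_text_alt num
instance (num : Int) (out : String) : Decidable (Spec_int_to_text num out) := by unfold Spec_int_to_text; infer_instance

-- ===== CLAIM =====
def Claim_equal_int_to_text : Prop := ∀ (num : Int), Dom_int_to_text num → Pre_int_to_text num → Spec_int_to_text num (int_to_text num)

-- ===== LEMMAS AND PROOFS =====

lemma A_eq_u_100 (n : Int) (_h0 : 0 ≤ n) (h1 : n < 100) : int_to_text n = under1000 n := by
  rw [int_to_text, under1000]
  split_ifs <;> simp_all [show bDict = aDict from rfl]

lemma A_eq_u (n : Int) (h0 : 0 ≤ n) (h1 : n < 1000) : int_to_text n = under1000 n := by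
  by_cases h2 : n < 100
  · exact A_eq_u_100 n h0 h2
  · rw [int_to_text, under1000]
    have hm0 : 0 ≤ PySem.Int.mod n 100 := PySem.Int.mod_nonneg _ (by norm_num)
    have hm1 : PySem.Int.mod n 100 < 100 := PySem.Int.mod_lt _ (by norm_num)
    rw [A_eq_u_100 _ hm0 hm1]
    split_ifs with a b c <;> simp_all [show bDict = aDict from rfl] <;>
      (simp only [String.append_assoc]; congr 1)

lemma B_small (n : Int) (h1 : n < 1000) : int_to_text_alt n = under1000 n := by
  rw [int_to_text_alt, dif_neg (by omega), if_pos h1]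

lemma fd_eq (n d : Int) (hd : 0 < d) : PySem.Int.floordiv n d = n / d :=
  PySem.Int.floordiv_eq_ediv_of_pos hd
lemma md_eq (n d : Int) (hd : 0 < d) : PySem.Int.mod n d = n % d :=
  PySem.Int.mod_eq_emod_of_pos hd

lemma AB_m (n : Int) (h0 : 0 ≤ n) (h1 : n < 1000000) : int_to_text n = int_to_text_alt n := by
  by_cases h2 : n < 1000
  · rw [B_small n h2]; exact A_eq_u n h0 h2
  · have c9 : ∀ m : Int, PySem.Int.floordiv m 1000000000 = m / 1000000000 := fun m => fd_eq m _ (by norm_num)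
    have c6 : ∀ m : Int, PySem.Int.floordiv m 1000000 = m / 1000000 := fun m => fd_eq m _ (by norm_num)
    have c3 : ∀ m : Int, PySem.Int.floordiv m 1000 = m / 1000 := fun m => fd_eq m _ (by norm_num)
    have d9 : ∀ m : Int, PySem.Int.mod m 1000000000 = m % 1000000000 := fun m => md_eq m _ (by norm_num)
    have d6 : ∀ m : Int, PySem.Int.mod m 1000000 = m % 1000000 := fun m => md_eq m _ (by norm_num)
    have d3 : ∀ m : Int, PySem.Int.mod m 1000 = m % 1000 := fun m => md_eq m _ (by norm_num)
    rw [int_to_text_alt, dif_neg (by omega), if_neg (by omega)]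
    simp only [List.foldl_cons, List.foldl_nil, c9, c6, c3, d3]
    rw [int_to_text]
    rw [dif_neg (by omega), dif_neg (by omega), dif_neg (by omega), dif_pos h1]
    simp only [c3, d3]
    have e9 : n / 1000000000 % 1000 = 0 := by omega
    have e6 : n / 1000000 % 1000 = 0 := by omega
    have e3 : n / 1000 % 1000 = n / 1000 := by omega
    have e3' : ¬ (n / 1000 = 0) := by omega
    simp only [e9, e6, e3, ne_eq, not_true_eq_false, if_false, ite_not]
    rw [A_eq_u _ (by omega) (by omega)]
    by_cases hz : n % 1000 = 0
    · simp only [if_pos hz, if_neg e3']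
      apply String.toList_inj.mp; simp [String.toList]
    · simp only [if_neg hz, if_neg e3']
      rw [A_eq_u _ (by omega) (by omega)]
      simp only [String.append_assoc, String.empty_append]
      congr 1

lemma AB_b (n : Int) (h0 : 0 ≤ n) (h1 : n < 1000000000) : int_to_text n = int_to_text_alt n := by
  by_cases h2 : n < 1000000
  · exact AB_m n h0 h2
  · have c9 : ∀ m : Int, PySem.Int.floordiv m 1000000000 = m / 1000000000 := fun m => fd_eq m _ (by norm_num)
    have c6 : ∀ m : Int, PySem.Int.floordiv m 1000000 = m / 1000000 := fun m => fd_eq m _ (by norm_num)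
    have c3 : ∀ m : Int, PySem.Int.floordiv m 1000 = m / 1000 := fun m => fd_eq m _ (by norm_num)
    have d9 : ∀ m : Int, PySem.Int.mod m 1000000000 = m % 1000000000 := fun m => md_eq m _ (by norm_num)
    have d6 : ∀ m : Int, PySem.Int.mod m 1000000 = m % 1000000 := fun m => md_eq m _ (by norm_num)
    have d3 : ∀ m : Int, PySem.Int.mod m 1000 = m % 1000 := fun m => md_eq m _ (by norm_num)
    rw [int_to_text_alt, dif_neg (by omega), if_neg (by omega)]
    simp only [List.foldl_cons, List.foldl_nil, c9, c6, c3, d3]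
    rw [int_to_text]
    rw [dif_neg (by omega), dif_neg (by omega), dif_neg (by omega), dif_neg (by omega), dif_pos h1]
    simp only [c6, d6]
    have e9 : n / 1000000000 % 1000 = 0 := by omega
    have e6 : n / 1000000 % 1000 = n / 1000000 := by omega
    have e6' : ¬ (n / 1000000 = 0) := by omega
    simp only [e9, e6, ne_eq, ite_not, if_true, if_neg e6', String.empty_append]
    rw [A_eq_u _ (by omega) (by omega)]
    by_cases hz : n % 1000000 = 0
    · have g1 : n / 1000 % 1000 = 0 := by omega
      have ht : n % 1000 = 0 := by omega
      simp only [hz, g1, ht, if_true, String.append_assoc]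
    · simp only [if_neg hz]
      by_cases hs : n % 1000000 < 1000
      · rw [A_eq_u _ (by omega) hs]
        have g1 : n / 1000 % 1000 = 0 := by omega
        have ht : ¬ (n % 1000 = 0) := by omega
        have et : n % 1000 = n % 1000000 := by omega
        simp only [g1, if_true, if_neg ht, String.append_assoc]
        rw [et]
        congr 1
      · rw [int_to_text]
        rw [dif_neg (by omega), dif_neg (by omega), dif_neg (by omega), dif_pos (by omega)]
        simp only [c3, d3]
        have eq1 : n % 1000000 / 1000 = n / 1000 % 1000 := by omega
        have eq2 : n % 1000000 % 1000 = n % 1000 := by omega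
        have g1 : ¬ (n / 1000 % 1000 = 0) := by omega
        rw [eq1, eq2, A_eq_u _ (by omega) (by omega)]
        simp only [if_neg g1]
        by_cases ht : n % 1000 = 0
        · simp only [ht, if_true, String.append_assoc]
          congr 1
        · simp only [if_neg ht, String.append_assoc]
          rw [A_eq_u _ (by omega) (by omega)]
          congr 1

lemma AB_t (n : Int) (h0 : 0 ≤ n) (h1 : n < 1000000000000) : int_to_text n = int_to_text_alt n := by
  by_cases h2 : n < 1000000000
  · exact AB_b n h0 h2
  · have c9 : ∀ m : Int, PySem.Int.floordiv m 1000000000 = m / 1000000000 := fun m => fd_eq m _ (by norm_num)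
    have c6 : ∀ m : Int, PySem.Int.floordiv m 1000000 = m / 1000000 := fun m => fd_eq m _ (by norm_num)
    have c3 : ∀ m : Int, PySem.Int.floordiv m 1000 = m / 1000 := fun m => fd_eq m _ (by norm_num)
    have d9 : ∀ m : Int, PySem.Int.mod m 1000000000 = m % 1000000000 := fun m => md_eq m _ (by norm_num)
    have d6 : ∀ m : Int, PySem.Int.mod m 1000000 = m % 1000000 := fun m => md_eq m _ (by norm_num)
    have d3 : ∀ m : Int, PySem.Int.mod m 1000 = m % 1000 := fun m => md_eq m _ (by norm_num)
    rw [int_to_text_alt, dif_neg (by omega), if_neg (by omega)]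
    simp only [List.foldl_cons, List.foldl_nil, c9, c6, c3, d3]
    rw [int_to_text]
    rw [dif_neg (by omega), dif_neg (by omega), dif_neg (by omega), dif_neg (by omega),
        dif_neg (by omega), dif_pos h1]
    simp only [c9, d9]
    have e9 : n / 1000000000 % 1000 = n / 1000000000 := by omega
    have e9' : ¬ (n / 1000000000 = 0) := by omega
    simp only [e9, ne_eq, ite_not, if_neg e9', String.empty_append]
    rw [A_eq_u _ (by omega) (by omega)]
    by_cases hz : n % 1000000000 = 0
    · have g2 : n / 1000000 % 1000 = 0 := by omega
      have g1 : n / 1000 % 1000 = 0 := by omega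
      have ht : n % 1000 = 0 := by omega
      simp only [hz, g2, g1, ht, if_true, String.append_assoc]
    · simp only [if_neg hz]
      by_cases hs1 : n % 1000000000 < 1000
      · rw [A_eq_u _ (by omega) hs1]
        have g2 : n / 1000000 % 1000 = 0 := by omega
        have g1 : n / 1000 % 1000 = 0 := by omega
        have ht : ¬ (n % 1000 = 0) := by omega
        simp only [g2, g1, if_true, if_neg ht, String.append_assoc]
        rw [show n % 1000 = n % 1000000000 by omega]
        congr 1
      · by_cases hs2 : n % 1000000000 < 1000000
        · -- remainder in the nghin band
          rw [int_to_text]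
          rw [dif_neg (by omega), dif_neg (by omega), dif_neg (by omega), dif_pos (by omega)]
          simp only [c3, d3]
          have g2 : n / 1000000 % 1000 = 0 := by omega
          have eq1 : n % 1000000000 / 1000 = n / 1000 % 1000 := by omega
          have eq2 : n % 1000000000 % 1000 = n % 1000 := by omega
          have g1 : ¬ (n / 1000 % 1000 = 0) := by omega
          rw [eq1, eq2, A_eq_u _ (by omega) (by omega)]
          simp only [g2, if_true, if_neg g1]
          by_cases ht : n % 1000 = 0
          · simp only [ht, if_true, String.append_assoc]
            congr 1
          · simp only [if_neg ht, String.append_assoc]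
            rw [A_eq_u _ (by omega) (by omega)]
            congr 1
        · -- remainder in the trieu band
          rw [int_to_text]
          rw [dif_neg (by omega), dif_neg (by omega), dif_neg (by omega), dif_neg (by omega),
              dif_pos (by omega)]
          simp only [c6, d6]
          have eq1 : n % 1000000000 / 1000000 = n / 1000000 % 1000 := by omega
          have eq2 : n % 1000000000 % 1000000 = n % 1000000 := by omega
          have g2 : ¬ (n / 1000000 % 1000 = 0) := by omega
          rw [eq1, eq2, A_eq_u _ (by omega) (by omega)]
          simp only [if_neg g2]
          by_cases hz2 : n % 1000000 = 0
          · have g1 : n / 1000 % 1000 = 0 := by omega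
            have ht : n % 1000 = 0 := by omega
            simp only [hz2, g1, ht, if_true, String.append_assoc]
            congr 1
          · simp only [if_neg hz2]
            by_cases hs3 : n % 1000000 < 1000
            · rw [A_eq_u _ (by omega) hs3]
              have g1 : n / 1000 % 1000 = 0 := by omega
              have ht : ¬ (n % 1000 = 0) := by omega
              simp only [g1, if_true, if_neg ht, String.append_assoc]
              rw [show n % 1000 = n % 1000000 by omega]
              congr 1
            · rw [int_to_text]
              rw [dif_neg (by omega), dif_neg (by omega), dif_neg (by omega), dif_pos (by omega)]
              simp only [c3, d3]
              have eq3 : n % 1000000 / 1000 = n / 1000 % 1000 := by omega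
              have eq4 : n % 1000000 % 1000 = n % 1000 := by omega
              have g1 : ¬ (n / 1000 % 1000 = 0) := by omega
              rw [eq3, eq4, A_eq_u _ (by omega) (by omega)]
              simp only [if_neg g1]
              by_cases ht : n % 1000 = 0
              · simp only [ht, if_true, String.append_assoc]
                congr 1
              · simp only [if_neg ht, String.append_assoc]
                rw [A_eq_u _ (by omega) (by omega)]
                congr 1

-- ===== VERDICT =====
theorem int_to_text_spec : Claim_equal_int_to_text := by
  intro num hdom hpre
  unfold Spec_int_to_text
  simp only [Dom_int_to_text, pvDomInt, decide_eq_true_eq] at hdom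
  exact AB_t num hpre (by omega)
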